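-- pv_equiv track=rewrite | github.com/wseungjin/SLRParser | lexical_analyzer.py | isBoolean
-- ===== SOURCE A (Python) =====
-- def isBoolean(stack): #4. 참 거짓인지 판단
--   state = "T0"
--   for i in stack:
--     if i=='t' and state=='T0':
--       state = 'T1'
--     elif i=='r' and state == 'T1':
--       state = 'T3'
--     elif i=='u' and state == 'T3':
--       state = 'T6'
--     elif i=='f' and state == 'T0':
--       state = 'T2'
--     elif i=='a' and state == 'T2':
--       state = 'T4'
--     elif i=='l' and state == 'T4':
--       state = 'T5'
--     elif i=='s' and state == 'T5':
--       state = 'T6'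
--     elif i=='e' and state == 'T6':
--       state = 'T7'
--     else:
--       state = 'false'
--       break
--
--   if state == 'T7':
--     return True
--   else:
--     return False
-- ===== SOURCE B (Python) =====
-- def isBoolean(stack):
--   return list(stack) == list("true") or list(stack) == list("false")
-- ===== Notes on version B (the rewrite author's own statement) =====
-- stated objective: simpler
-- what changed: Replaced the per-character finite-state machine with a direct comparison of the whole input against the two accepted literals 'true' and 'false'.
import Mathlib
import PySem

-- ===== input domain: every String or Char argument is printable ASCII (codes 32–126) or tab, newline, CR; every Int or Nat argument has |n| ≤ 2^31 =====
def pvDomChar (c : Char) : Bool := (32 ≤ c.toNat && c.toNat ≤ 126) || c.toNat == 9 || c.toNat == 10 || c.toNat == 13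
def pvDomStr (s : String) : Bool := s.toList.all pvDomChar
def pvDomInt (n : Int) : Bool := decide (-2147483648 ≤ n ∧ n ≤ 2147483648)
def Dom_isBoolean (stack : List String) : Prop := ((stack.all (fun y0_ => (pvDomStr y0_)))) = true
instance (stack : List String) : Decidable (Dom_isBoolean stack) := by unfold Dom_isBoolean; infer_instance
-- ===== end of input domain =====

-- B replaces the explicit per-character state machine by a direct comparison with the
-- two accepted literals; return value only, no side effects. Objective: simpler.

-- ===== PORT A =====
-- Loop of A: state machine over the items; the 'break' branch returns state "false" directly.
def isBooleanLoop : List String → String → String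
  | [], state => state
  | i :: rest, state =>
    if i = "t" ∧ state = "T0" then isBooleanLoop rest "T1"
    else if i = "r" ∧ state = "T1" then isBooleanLoop rest "T3"
    else if i = "u" ∧ state = "T3" then isBooleanLoop rest "T6"
    else if i = "f" ∧ state = "T0" then isBooleanLoop rest "T2"
    else if i = "a" ∧ state = "T2" then isBooleanLoop rest "T4"
    else if i = "l" ∧ state = "T4" then isBooleanLoop rest "T5"
    else if i = "s" ∧ state = "T5" then isBooleanLoop rest "T6"
    else if i = "e" ∧ state = "T6" then isBooleanLoop rest "T7"
    else "false"

def isBoolean (stack : List String) : Bool :=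
  if isBooleanLoop stack "T0" = "T7" then true else false

-- ===== PORT B =====
def isBoolean_alt (stack : List String) : Bool :=
  stack = ["t", "r", "u", "e"] ∨ stack = ["f", "a", "l", "s", "e"]

-- ===== PRECONDITION & SPEC =====
def Spec_isBoolean (stack : List String) (out : Bool) : Prop := out = isBoolean_alt stack
instance (stack : List String) (out : Bool) : Decidable (Spec_isBoolean stack out) := by unfold Spec_isBoolean; infer_instance

-- ===== CLAIM (what is proved, stated in full; the proofs are below) =====
def Claim_equal_isBoolean : Prop := ∀ (stack : List String), Dom_isBoolean stack → Spec_isBoolean stack (isBoolean stack)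

-- ===== LEMMAS AND PROOFS =====


-- Suffix characterisation of the state machine: from each state, exactly one suffix reaches "T7".
theorem loop_T7 (l : List String) : isBooleanLoop l "T7" = "T7" ↔ l = [] := by
  cases l with
  | nil => simp [isBooleanLoop]
  | cons i rest => simp [isBooleanLoop]

theorem loop_T6 (l : List String) : isBooleanLoop l "T6" = "T7" ↔ l = ["e"] := by
  cases l with
  | nil => simp [isBooleanLoop]
  | cons i rest =>
    simp only [isBooleanLoop]
    split_ifs with h1 h2 h3 h4 h5 h6 h7 h8 <;>
      simp_all [loop_T7]

theorem loop_T5 (l : List String) : isBooleanLoop l "T5" = "T7" ↔ l = ["s", "e"] := by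
  cases l with
  | nil => simp [isBooleanLoop]
  | cons i rest =>
    simp only [isBooleanLoop]
    split_ifs with h1 h2 h3 h4 h5 h6 h7 h8 <;>
      simp_all [loop_T6]

theorem loop_T4 (l : List String) : isBooleanLoop l "T4" = "T7" ↔ l = ["l", "s", "e"] := by
  cases l with
  | nil => simp [isBooleanLoop]
  | cons i rest =>
    simp only [isBooleanLoop]
    split_ifs with h1 h2 h3 h4 h5 h6 h7 h8 <;>
      simp_all [loop_T5]

theorem loop_T3 (l : List String) : isBooleanLoop l "T3" = "T7" ↔ l = ["u", "e"] := by
  cases l with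
  | nil => simp [isBooleanLoop]
  | cons i rest =>
    simp only [isBooleanLoop]
    split_ifs with h1 h2 h3 h4 h5 h6 h7 h8 <;>
      simp_all [loop_T6]

theorem loop_T2 (l : List String) : isBooleanLoop l "T2" = "T7" ↔ l = ["a", "l", "s", "e"] := by
  cases l with
  | nil => simp [isBooleanLoop]
  | cons i rest =>
    simp only [isBooleanLoop]
    split_ifs with h1 h2 h3 h4 h5 h6 h7 h8 <;>
      simp_all [loop_T4]

theorem loop_T1 (l : List String) : isBooleanLoop l "T1" = "T7" ↔ l = ["r", "u", "e"] := by
  cases l with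
  | nil => simp [isBooleanLoop]
  | cons i rest =>
    simp only [isBooleanLoop]
    split_ifs with h1 h2 h3 h4 h5 h6 h7 h8 <;>
      simp_all [loop_T3]

theorem loop_T0 (l : List String) :
    isBooleanLoop l "T0" = "T7" ↔ l = ["t", "r", "u", "e"] ∨ l = ["f", "a", "l", "s", "e"] := by
  cases l with
  | nil => simp [isBooleanLoop]
  | cons i rest =>
    simp only [isBooleanLoop]
    split_ifs with h1 h2 h3 h4 h5 h6 h7 h8 <;>
      simp_all [loop_T1, loop_T2]

-- ===== VERDICT (by name: the statement is the Claim_ definition above) =====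
theorem isBoolean_spec : Claim_equal_isBoolean := by
  intro stack _
  unfold Spec_isBoolean isBoolean isBoolean_alt
  by_cases h : isBooleanLoop stack "T0" = "T7"
  · rcases (loop_T0 stack).1 h with h' | h' <;> subst h' <;> decide
  · have h' : ¬ (stack = ["t", "r", "u", "e"] ∨ stack = ["f", "a", "l", "s", "e"]) :=
      fun hc => h ((loop_T0 stack).2 hc)
    simp [h, h']
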